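-- pv_equiv track=rewrite | github.com/melngr/aoc17 | 17/day01.py | next_sum
-- ===== SOURCE A (Python) =====
-- def next_sum(captcha):
--     total = 0
--
--     for i in range(0, len(captcha)):
--         if ( i != (len(captcha) - 1) ):
--             j = i + 1
--         else:
--             j = 0
--
--         try:
--             at_i = captcha[i]
--             at_j = captcha[j]
--         except IndexError as err:
--             raise IndexError( err )
--
--         if ( at_i == at_j ):
--             total += int(at_i)
--
--     return total
-- ===== SOURCE B (Python) =====
-- def next_sum(captcha):
--     def go(rest, first):
--         if len(rest) == 1:
--             return int(rest[0]) if rest[0] == first else 0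
--         return (int(rest[0]) if rest[0] == rest[1] else 0) + go(rest[1:], first)
--     if len(captcha) == 0:
--         return 0
--     return go(captcha, captcha[0])
-- ===== Notes on version B (the rewrite author's own statement) =====
-- stated objective: alternative
-- what changed: Replaces the index loop with explicit wraparound branching and try/except by a structural recursion over the remaining suffix that compares each element with its immediate successor and, at the final element, with the remembered first element.
import Mathlib
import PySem

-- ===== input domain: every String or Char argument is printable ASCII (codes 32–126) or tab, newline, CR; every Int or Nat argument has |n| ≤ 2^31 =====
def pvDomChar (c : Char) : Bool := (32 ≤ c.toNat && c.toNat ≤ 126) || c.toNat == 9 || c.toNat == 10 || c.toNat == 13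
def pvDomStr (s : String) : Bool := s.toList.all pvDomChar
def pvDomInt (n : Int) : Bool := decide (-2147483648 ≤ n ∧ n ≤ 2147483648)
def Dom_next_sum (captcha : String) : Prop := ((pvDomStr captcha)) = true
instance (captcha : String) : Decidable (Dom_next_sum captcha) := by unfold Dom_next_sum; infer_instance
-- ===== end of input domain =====

-- B replaces A's index loop with wraparound branching by a structural recursion over the
-- suffix, comparing each element with its successor and the last with the remembered
-- first element (alternative decomposition; same result).

-- ===== PORT A =====
-- indices i and j are always in range, so the IndexError branch is unreachable; the
-- getD-defaults of pyGetD / ofChars? are never the result on inputs satisfying Pre_.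
def next_sum (captcha : String) : Int :=
  let cs := captcha.toList
  let n : Int := cs.length
  (PySem.List.pyRange 0 n 1).foldl (fun total i =>
    let j : Int := if i ≠ n - 1 then i + 1 else 0
    let at_i := PySem.List.pyGetD cs i ' '
    let at_j := PySem.List.pyGetD cs j ' '
    if at_i == at_j then total + (PySem.Int.ofChars? [at_i]).getD 0 else total) 0

-- ===== PORT B =====
-- go(rest, first): structural recursion of Source B; int(c) ported as PySem.Int.ofChars?
def next_sum_alt_go (first : Char) : List Char → Int
  | [] => 0
  | [c] => if c == first then (PySem.Int.ofChars? [c]).getD 0 else 0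
  | c :: d :: rest =>
      (if c == d then (PySem.Int.ofChars? [c]).getD 0 else 0)
        + next_sum_alt_go first (d :: rest)

def next_sum_alt (captcha : String) : Int :=
  match captcha.toList with
  | [] => 0
  | c :: rest => next_sum_alt_go c (c :: rest)

-- ===== PRECONDITION & SPEC =====
-- Pre_ excludes exactly the inputs where A raises ValueError: a character equal to its
-- circular successor that is not a decimal digit (int() fails on it). B raises there too.
def Pre_next_sum (captcha : String) : Prop :=
  ∀ p ∈ captcha.toList.zip (captcha.toList.drop 1 ++ captcha.toList.take 1),
    p.1 = p.2 → p.1.isDigit = true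
instance (captcha : String) : Decidable (Pre_next_sum captcha) := by
  unfold Pre_next_sum; infer_instance
def pvWitness_next_sum : String := "91212129"
def Spec_next_sum (captcha : String) (out : Int) : Prop := out = next_sum_alt captcha
instance (captcha : String) (out : Int) : Decidable (Spec_next_sum captcha out) := by unfold Spec_next_sum; infer_instance

-- ===== CLAIM (what is proved, stated in full; the proofs are below) =====
def Claim_equal_next_sum : Prop := ∀ (captcha : String), Dom_next_sum captcha → Pre_next_sum captcha → Spec_next_sum captcha (next_sum captcha)

-- ===== LEMMAS AND PROOFS =====

def pvPairVal (p : Char × Char) : Int :=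
  if p.1 == p.2 then (PySem.Int.ofChars? [p.1]).getD 0 else 0

theorem foldl_if_add {α : Type} (l : List α) (p : α → Bool) (g : α → Int) (a : Int) :
    l.foldl (fun t x => if p x then t + g x else t) a
      = a + (l.map (fun x => if p x then g x else 0)).sum := by
  induction l generalizing a with
  | nil => simp
  | cons x l ih =>
    simp only [List.foldl_cons, List.map_cons, List.sum_cons, ih]
    split_ifs <;> ring

-- the zipped pairs, written by index
theorem zip_rot_eq_map_range (cs : List Char) :
    cs.zip (cs.drop 1 ++ cs.take 1) =
      (List.range cs.length).map (fun k =>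
        (cs.getD k ' ', cs.getD (if k + 1 < cs.length then k + 1 else 0) ' ')) := by
  apply List.ext_getElem
  · simp [List.length_zip]
    omega
  · intro i h1 h2
    have hi : i < cs.length := by
      simp [List.length_zip] at h1; omega
    have hrotlen : (cs.drop 1 ++ cs.take 1).length = cs.length := by
      simp; omega
    have hrot : (cs.drop 1 ++ cs.take 1)[i]'(by omega) =
        cs.getD (if i + 1 < cs.length then i + 1 else 0) ' ' := by
      by_cases hlt : i + 1 < cs.length
      · have hdl : i < (cs.drop 1).length := by simp; omega
        rw [if_pos hlt, List.getElem_append_left hdl, List.getElem_drop,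
          List.getD_eq_getElem cs ' ' hlt]
        congr 1
        omega
      · have hdl : (cs.drop 1).length ≤ i := by simp; omega
        have h0 : 0 < cs.length := by omega
        rw [if_neg hlt, List.getElem_append_right hdl, List.getElem_take,
          List.getD_eq_getElem cs ' ' h0]
        congr 1
        simp
        omega
    simp only [List.getElem_zip, List.getElem_map, List.getElem_range, hrot]
    congr 1
    simp [List.getD_eq_getElem?_getD, List.getElem?_eq_getElem hi]

-- A's value equals the sum of pvPairVal over the string zipped with its rotation
theorem A_eq_zip (captcha : String) :
    next_sum captcha =
      ((captcha.toList.zip (captcha.toList.drop 1 ++ captcha.toList.take 1)).map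
        pvPairVal).sum := by
  simp only [next_sum]
  set cs := captcha.toList with hcs
  rw [zip_rot_eq_map_range, foldl_if_add, List.map_map]
  rw [PySem.List.pyRange_one]
  simp only [sub_zero, Int.toNat_natCast, zero_add, List.map_map]
  congr 1
  apply List.map_congr_left
  intro k hk
  have hk' : k < cs.length := List.mem_range.mp hk
  simp only [Function.comp_apply, PySem.List.pyGetD_natCast, pvPairVal]
  by_cases hlt : k + 1 < cs.length
  · have hne : (k : Int) ≠ (cs.length : Int) - 1 := by omega
    rw [if_pos hne, if_pos hlt,
      show ((k : Int) + 1) = (((k + 1 : Nat)) : Int) by push_cast; ring,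
      PySem.List.pyGetD_natCast]
  · have hne : ¬ ((k : Int) ≠ (cs.length : Int) - 1) := by omega
    rw [if_neg hne, if_neg hlt,
      show (0 : Int) = ((0 : Nat) : Int) from rfl, PySem.List.pyGetD_natCast]

-- B's recursion sums pvPairVal over the list zipped with (its tail ++ [first])
theorem go_eq_zip (first : Char) :
    ∀ cs : List Char, cs ≠ [] →
      next_sum_alt_go first cs =
        ((cs.zip (cs.drop 1 ++ [first])).map pvPairVal).sum := by
  intro cs
  induction cs with
  | nil => intro h; exact absurd rfl h
  | cons c rest ih =>
    intro _
    cases rest with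
    | nil => simp [next_sum_alt_go, pvPairVal]
    | cons d rest' =>
      have ih' := ih (by simp)
      simp only [next_sum_alt_go, ih', List.drop_succ_cons, List.drop_zero]
      simp [pvPairVal]

-- ===== VERDICT (by name: the statement is the Claim_ definition above) =====
theorem next_sum_spec : Claim_equal_next_sum := by
  intro captcha _ _
  show next_sum captcha = next_sum_alt captcha
  rw [A_eq_zip]
  simp only [next_sum_alt]
  cases h : captcha.toList with
  | nil => simp
  | cons c rest =>
    rw [show (match c :: rest with
          | [] => (0 : Int)
          | c :: rest => next_sum_alt_go c (c :: rest)) = next_sum_alt_go c (c :: rest)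
        from rfl,
      go_eq_zip c (c :: rest) (by simp)]
    simp
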